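-- pv_equiv track=rewrite | github.com/videlec/max_plus | max_plus/combinat.py | prefix_suffix_all_subwords
-- ===== SOURCE A (Python) =====
-- def prefix_suffix_all_subwords(left, r):
--     r"""
--     Return a list of the same length as left that is filled with the minimal
--     prefix and suffix that contain all subwords of length ``r``.
--
--     Return a pair ``(is_trivial, right)``.
--
--     INPUT:
--
--     - ``left`` -- a list that corresponds to a word on a binary alphabet
--
--     - ``r`` -- a non-negative integer
--
--     EXAMPLES::
--
--         sage: from max_plus.combinat import prefix_suffix_all_subwords
--
--         sage: prefix_suffix_all_subwords(list('ab'), 0)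
--         (False, [None, None])
--
--         sage: prefix_suffix_all_subwords(list('ab'), 1)
--         (True, ['a', 'b'])
--         sage: prefix_suffix_all_subwords(list('aba'), 1)
--         (True, ['a', 'b', 'a'])
--         sage: prefix_suffix_all_subwords(list('abbba'), 1)
--         (False, ['a', 'b', None, 'b', 'a'])
--         sage: prefix_suffix_all_subwords(list('aabbbaa'),1)
--         (False, ['a', 'a', 'b', None, 'b', 'a', 'a'])
--
--         sage: prefix_suffix_all_subwords(list('aabbaabbaa'), 2)
--         (True, ['a', 'a', 'b', 'b', 'a', 'a', 'b', 'b', 'a', 'a'])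
--         sage: prefix_suffix_all_subwords(list('abaababababa'), 2)
--         (False, ['a', 'b', 'a', 'a', 'b', None, None, None, 'b', 'a', 'b', 'a'])
--         sage: prefix_suffix_all_subwords(list('bbaabababa'), 2)
--         (False, ['b', 'b', 'a', 'a', 'b', None, 'b', 'a', 'b', 'a'])
--         sage: prefix_suffix_all_subwords(list('abbababbab'), 2)
--         (False, ['a', 'b', 'b', 'a', None, 'a', 'b', 'b', 'a', 'b'])
--         sage: prefix_suffix_all_subwords(list('abbababbaab'), 2)
--         (False, ['a', 'b', 'b', 'a', None, None, None, 'b', 'a', 'a', 'b'])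
--     """
--     n = len(left)
--
--     # minimal prefix
--     i = 0
--     k = 0
--     while i < n and k < r:
--         i0 = i
--         i += 1
--         while i < n and left[i] == left[i0]:
--             i += 1
--         k += 1
--         i += 1
--     i -= 1
--
--     if i == n-1:
--         return True, list(left)
--
--     # minimal suffix
--     j = n-1
--     k = 0
--     while j >= 0 and k < r:
--         j0 = j
--         j -= 1
--         while j >= 0 and left[j] == left[j0]:
--             j -= 1
--         k += 1
--         j -= 1
--     j += 1
--
--     if j <= i+1:
--         return True, list(left)
--     else:
--         return False, list(left[:i+1]) + [None] * (n-(i+1)-(n-j)) + list(left[j:])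
-- ===== SOURCE B (Python) =====
-- def _run_starts(seq):
--     """rs[t] = first index of the maximal run of equal elements containing t."""
--     rs = []
--     cur = 0
--     for t in range(len(seq)):
--         if t > 0 and seq[t] != seq[t - 1]:
--             cur = t
--         rs.append(cur)
--     return rs
--
--
-- def _run_ends(seq):
--     """re[t] = last index of the maximal run of equal elements containing t."""
--     n = len(seq)
--     re = [0] * n
--     for t in range(n - 1, -1, -1):
--         re[t] = re[t + 1] if t + 1 < n and seq[t] == seq[t + 1] else t
--     return re
--
--
-- def prefix_suffix_all_subwords(left, r):
--     n = len(left)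
--     re = _run_ends(left)
--
--     # minimal prefix: jump over one run plus one letter, r times
--     i = 0
--     k = 0
--     while i < n and k < r:
--         i = re[i] + 2
--         k += 1
--     i -= 1
--
--     if i == n - 1:
--         return True, list(left)
--
--     rs = _run_starts(left)
--
--     # minimal suffix: symmetric jumps from the right
--     j = n - 1
--     k = 0
--     while j >= 0 and k < r:
--         j = rs[j] - 2
--         k += 1
--     j += 1
--
--     if j <= i + 1:
--         return True, list(left)
--     return False, list(left[:i + 1]) + [None] * (j - i - 1) + list(left[j:])
-- ===== Notes on version B (the rewrite author's own statement) =====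
-- stated objective: alternative
-- what changed: A's nested run-skipping while-loops on each side are replaced by precomputed run-start/run-end index tables (two linear passes) plus a single table-driven jump loop per side, with no inner scan.
import Mathlib
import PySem

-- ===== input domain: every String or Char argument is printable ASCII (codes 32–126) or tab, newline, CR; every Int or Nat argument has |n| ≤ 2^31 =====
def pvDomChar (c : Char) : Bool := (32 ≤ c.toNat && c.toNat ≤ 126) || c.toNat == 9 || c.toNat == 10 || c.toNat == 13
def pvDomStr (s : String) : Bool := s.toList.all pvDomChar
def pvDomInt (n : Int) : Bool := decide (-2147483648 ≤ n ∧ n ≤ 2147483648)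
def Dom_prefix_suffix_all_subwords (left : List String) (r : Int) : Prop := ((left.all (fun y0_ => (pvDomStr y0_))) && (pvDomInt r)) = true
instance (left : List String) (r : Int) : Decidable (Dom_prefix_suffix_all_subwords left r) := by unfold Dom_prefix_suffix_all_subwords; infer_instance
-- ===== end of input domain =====

-- B replaces A's nested run-skipping while-loops by precomputed run-start/run-end tables and a
-- single jump loop per side (objective: alternative — same O(n) cost, different structure).

-- ===== PORT A =====
-- inner `while i < n and left[i] == left[i0]` of the prefix scan
def pvA_skipF (left : List String) (n : Int) (x : String) (i : Int) : Int :=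
  if h : i < n ∧ PySem.List.pyGet? left i = some x then pvA_skipF left n x (i + 1) else i
termination_by (n - i).toNat
decreasing_by omega

-- outer `while i < n and k < r` of the prefix scan
def pvA_loopF (left : List String) (n r : Int) (i k : Int) : Int :=
  if h : i < n ∧ k < r then
    pvA_loopF left n r (pvA_skipF left n ((PySem.List.pyGet? left i).getD "") (i + 1) + 1) (k + 1)
  else i
termination_by (r - k).toNat
decreasing_by omega

-- inner `while j >= 0 and left[j] == left[j0]` of the suffix scan
def pvA_skipB (left : List String) (x : String) (j : Int) : Int :=
  if h : 0 ≤ j ∧ PySem.List.pyGet? left j = some x then pvA_skipB left x (j - 1) else j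
termination_by (j + 1).toNat
decreasing_by omega

-- outer `while j >= 0 and k < r` of the suffix scan
def pvA_loopB (left : List String) (r : Int) (j k : Int) : Int :=
  if h : 0 ≤ j ∧ k < r then
    pvA_loopB left r (pvA_skipB left ((PySem.List.pyGet? left j).getD "") (j - 1) - 1) (k + 1)
  else j
termination_by (r - k).toNat
decreasing_by omega

def prefix_suffix_all_subwords (left : List String) (r : Int) : Bool × List (Option String) :=
  let n : Int := left.length
  let i := pvA_loopF left n r 0 0 - 1
  if i = n - 1 then (true, left.map some)
  else
    let j := pvA_loopB left r (n - 1) 0 + 1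
    if j ≤ i + 1 then (true, left.map some)
    else (false, (PySem.List.slice left none (some (i + 1))).map some
                 ++ List.replicate (n - (i + 1) - (n - j)).toNat (none : Option String)
                 ++ (PySem.List.slice left (some j) none).map some)

-- ===== PORT B =====
-- `_run_starts` loop body: prev = seq[t-1], cur = run start of position t-1
def pvB_rsGo (prev : String) (t cur : Int) : List String → List Int
  | [] => []
  | x :: xs =>
      let cur' := if x ≠ prev then t else cur
      cur' :: pvB_rsGo x (t + 1) cur' xs

def pvB_runStarts : List String → List Int
  | [] => []
  | x :: xs => 0 :: pvB_rsGo x 1 0 xs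

-- `_run_ends` backward pass: re[t] = re[t+1] if seq[t] == seq[t+1] else t
def pvB_runEnds : List String → Int → List Int
  | [], _ => []
  | [_], t => [t]
  | x :: y :: xs, t =>
      let rest := pvB_runEnds (y :: xs) (t + 1)
      (if x = y then rest.headD 0 else t) :: rest

-- prefix jump loop: i = re[i] + 2, r times
def pvB_jumpF (re : List Int) (n r : Int) (i k : Int) : Int :=
  if h : i < n ∧ k < r then
    pvB_jumpF re n r ((PySem.List.pyGet? re i).getD 0 + 2) (k + 1)
  else i
termination_by (r - k).toNat
decreasing_by omega

-- suffix jump loop: j = rs[j] - 2, r times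
def pvB_jumpB (rs : List Int) (r : Int) (j k : Int) : Int :=
  if h : 0 ≤ j ∧ k < r then
    pvB_jumpB rs r ((PySem.List.pyGet? rs j).getD 0 - 2) (k + 1)
  else j
termination_by (r - k).toNat
decreasing_by omega

def prefix_suffix_all_subwords_alt (left : List String) (r : Int) : Bool × List (Option String) :=
  let n : Int := left.length
  let re := pvB_runEnds left 0
  let i := pvB_jumpF re n r 0 0 - 1
  if i = n - 1 then (true, left.map some)
  else
    let rs := pvB_runStarts left
    let j := pvB_jumpB rs r (n - 1) 0 + 1
    if j ≤ i + 1 then (true, left.map some)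
    else (false, (PySem.List.slice left none (some (i + 1))).map some
                 ++ List.replicate (j - i - 1).toNat (none : Option String)
                 ++ (PySem.List.slice left (some j) none).map some)

-- ===== PRECONDITION & SPEC =====
def Spec_prefix_suffix_all_subwords (left : List String) (r : Int) (out : Bool × List (Option String)) : Prop := out = prefix_suffix_all_subwords_alt left r
instance (left : List String) (r : Int) (out : Bool × List (Option String)) : Decidable (Spec_prefix_suffix_all_subwords left r out) := by unfold Spec_prefix_suffix_all_subwords; infer_instance

-- ===== CLAIM (what is proved, stated in full; the proofs are below) =====
def Claim_equal_prefix_suffix_all_subwords : Prop := ∀ (left : List String) (r : Int), Dom_prefix_suffix_all_subwords left r → Spec_prefix_suffix_all_subwords left r (prefix_suffix_all_subwords left r)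

-- ===== LEMMAS AND PROOFS =====

-- run-end of the run containing position i (index, as a Nat)
def reSpec (l : List String) (i : Nat) : Nat :=
  if h : i + 1 < l.length ∧ l[i + 1]? = l[i]? then reSpec l (i + 1) else i
termination_by l.length - i
decreasing_by omega

def rsSpec (l : List String) (i : Nat) : Nat :=
  if h : 0 < i ∧ l[i - 1]? = l[i]? then rsSpec l (i - 1) else i
termination_by i
decreasing_by omega

theorem reSpec_cons (x : String) (l : List String) (i : Nat) :
    reSpec (x :: l) (i + 1) = reSpec l i + 1 := by
  fun_induction reSpec l i with
  | case1 i h ih =>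
      rw [reSpec]
      simp only [List.length_cons, List.getElem?_cons_succ]
      rw [dif_pos (by constructor <;> [omega; exact h.2])]
      exact ih
  | case2 i h =>
      rw [reSpec, dif_neg]
      simp only [List.length_cons, List.getElem?_cons_succ]
      intro hc; exact h ⟨by omega, hc.2⟩

theorem skipF_eq (l : List String) (i : Nat) : ∀ (x : String), i < l.length → l[i]? = some x →
    pvA_skipF l l.length x ((i : Int) + 1) = (reSpec l i : Int) + 1 := by
  fun_induction reSpec l i with
  | case1 i h ih =>
      intro x hi hx
      rw [pvA_skipF, dif_pos]
      · have e : ((i : Int) + 1) + 1 = ((i + 1 : Nat) : Int) + 1 := by push_cast; ring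
        rw [e]
        exact ih x h.1 (h.2.trans hx)
      · refine ⟨by omega, ?_⟩
        have e : ((i : Int) + 1) = ((i + 1 : Nat) : Int) := by push_cast; ring
        rw [e, PySem.List.pyGet?_natCast]
        exact h.2.trans hx
  | case2 i h =>
      intro x hi hx
      rw [pvA_skipF, dif_neg]
      intro hc
      have e : ((i : Int) + 1) = ((i + 1 : Nat) : Int) := by push_cast; ring
      rw [e, PySem.List.pyGet?_natCast] at hc
      by_cases hl : i + 1 < l.length
      · exact h ⟨hl, hc.2.trans hx.symm⟩
      · exact hl (by exact_mod_cast hc.1)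

theorem skipB_eq (l : List String) (i : Nat) : ∀ (x : String), i < l.length → l[i]? = some x →
    pvA_skipB l x ((i : Int) - 1) = (rsSpec l i : Int) - 1 := by
  fun_induction rsSpec l i with
  | case1 i h ih =>
      intro x hi hx
      rw [pvA_skipB, dif_pos]
      · have e : ((i : Int) - 1) - 1 = ((i - 1 : Nat) : Int) - 1 := by omega
        rw [e]
        exact ih x (by omega) (h.2.trans hx)
      · refine ⟨by omega, ?_⟩
        have e : ((i : Int) - 1) = ((i - 1 : Nat) : Int) := by omega
        rw [e, PySem.List.pyGet?_natCast]
        exact h.2.trans hx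
  | case2 i h =>
      intro x hi hx
      rw [pvA_skipB, dif_neg]
      intro hc
      have h0 : 0 < i := by omega
      have e : ((i : Int) - 1) = ((i - 1 : Nat) : Int) := by omega
      rw [e, PySem.List.pyGet?_natCast] at hc
      exact h ⟨h0, hc.2.trans hx.symm⟩

theorem runEnds_get (l : List String) (t : Int) (i : Nat) (h : i < l.length) :
    (pvB_runEnds l t)[i]? = some (t + (reSpec l i : Int)) := by
  fun_induction pvB_runEnds l t generalizing i with
  | case1 t => simp at h
  | case2 x t =>
      have : i = 0 := by simpa using h
      subst this
      simp [reSpec]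
  | case3 x y xs t rest ih =>
      match i with
      | 0 =>
          simp only [List.getElem?_cons_zero, rest]
          by_cases hxy : x = y
          · rw [if_pos hxy]
            have h0 := ih 0 (by simp)
            have hh : (pvB_runEnds (y :: xs) (t + 1)).headD 0 = (t + 1) + (reSpec (y :: xs) 0 : Int) := by
              rw [List.headD_eq_head?_getD, List.head?_eq_getElem?, h0]; rfl
            rw [hh]
            have e : reSpec (x :: y :: xs) 0 = reSpec (y :: xs) 0 + 1 := by
              rw [reSpec, dif_pos (by simp [hxy])]
              exact reSpec_cons x (y :: xs) 0
            rw [e]; push_cast; ring_nf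
          · rw [if_neg hxy]
            have e : reSpec (x :: y :: xs) 0 = 0 := by
              rw [reSpec, dif_neg]
              intro hc
              exact hxy (by simpa using hc.2.symm)
            rw [e]; simp
      | i + 1 =>
          simp only [List.getElem?_cons_succ, rest]
          rw [ih i (by simpa using h), reSpec_cons]
          push_cast; ring_nf

theorem rsGo_get (l : List String) (xs : List String) : ∀ (t : Nat) (prev : String) (cur : Int),
    1 ≤ t → l.drop t = xs → l[t - 1]? = some prev → cur = (rsSpec l (t - 1) : Int) →
    ∀ i : Nat, i < xs.length → (pvB_rsGo prev (t : Int) cur xs)[i]? = some ((rsSpec l (t + i) : Int)) := by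
  induction xs with
  | nil => intro t prev cur _ _ _ _ i hi; simp at hi
  | cons x xs' ih =>
      intro t prev cur ht hdrop hprev hcur i hi
      have hxt : l[t]? = some x := by
        have h0 : (l.drop t)[0]? = l[t + 0]? := List.getElem?_drop
        rw [hdrop] at h0
        simpa using h0.symm
      have hdrop' : l.drop (t + 1) = xs' := by
        have e : l.drop (t + 1) = (l.drop t).tail := by
          rw [← List.drop_drop]
          simp
        rw [e, hdrop]
        rfl
      have hcur' : (if x ≠ prev then (t : Int) else cur) = (rsSpec l t : Int) := by
        by_cases hpx : prev = x
        · rw [if_neg (by simp [hpx]), rsSpec, dif_pos ⟨by omega, by rw [hprev, hxt, hpx]⟩]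
          simpa [hpx] using hcur
        · rw [if_pos (fun hc => hpx hc.symm), rsSpec,
              dif_neg (fun hc => hpx (by rw [hprev, hxt] at hc; simpa using hc.2))]
      match i with
      | 0 =>
          simp only [pvB_rsGo, List.getElem?_cons_zero, Option.some.injEq, Nat.add_zero]
          exact hcur'
      | i + 1 =>
          simp only [pvB_rsGo, List.getElem?_cons_succ]
          have e : ((t : Int) + 1) = ((t + 1 : Nat) : Int) := by push_cast; ring
          have e2 : t + 1 + i = t + (i + 1) := by omega
          rw [e, ih (t + 1) x _ (by omega) hdrop' (by simpa using hxt) (by simpa using hcur'), e2]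
          simpa using hi

theorem runStarts_get (l : List String) (i : Nat) (h : i < l.length) :
    (pvB_runStarts l)[i]? = some ((rsSpec l i : Int)) := by
  match l, i with
  | [], _ => simp at h
  | x :: xs, 0 =>
      simp only [pvB_runStarts, List.getElem?_cons_zero, Option.some.injEq]
      rw [rsSpec, dif_neg (by intro hc; omega)]
      simp
  | x :: xs, i + 1 =>
      simp only [pvB_runStarts, List.getElem?_cons_succ]
      have h1 : ((x :: xs) : List String)[1 - 1]? = some x := by simp
      have h2 : (0 : Int) = (rsSpec (x :: xs) (1 - 1) : Int) := by
        rw [rsSpec, dif_neg (by intro hc; omega)]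
        simp
      have e : 1 + i = i + 1 := by omega
      have := rsGo_get (x :: xs) xs 1 x 0 (by omega) (by simp) h1 h2 i (by simpa using h)
      rw [e] at this
      exact_mod_cast this

theorem rsSpec_le (l : List String) (i : Nat) : rsSpec l i ≤ i := by
  fun_induction rsSpec l i with
  | case1 i h ih => omega
  | case2 i h => omega

theorem pyGet?_of_lt (l : List String) (i : Int) (h0 : 0 ≤ i) :
    PySem.List.pyGet? l i = l[i.toNat]? := by
  rw [← PySem.List.pyGet?_natCast l i.toNat]
  congr 1
  omega

theorem pyGet?_of_lt' (l : List Int) (i : Int) (h0 : 0 ≤ i) :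
    PySem.List.pyGet? l i = l[i.toNat]? := by
  rw [← PySem.List.pyGet?_natCast l i.toNat]
  congr 1
  omega

theorem loopF_eq (l : List String) (r : Int) (k i : Int) (hi : 0 ≤ i) :
    pvA_loopF l l.length r i k = pvB_jumpF (pvB_runEnds l 0) l.length r i k := by
  have main : ∀ fuel (k i : Int), (r - k).toNat ≤ fuel → 0 ≤ i →
      pvA_loopF l l.length r i k = pvB_jumpF (pvB_runEnds l 0) l.length r i k := by
    intro fuel
    induction fuel with
    | zero =>
        intro k i hf _
        rw [pvA_loopF, pvB_jumpF, dif_neg (by omega), dif_neg (by omega)]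
    | succ fuel ihf =>
        intro k i hf hi
        by_cases hc : i < (l.length : Int) ∧ k < r
        · rw [pvA_loopF, pvB_jumpF, dif_pos hc, dif_pos hc]
          have hmlt : i.toNat < l.length := by omega
          have hgx : PySem.List.pyGet? l i = some l[i.toNat] := by
            rw [pyGet?_of_lt l i hi]
            simp [hmlt]
          have hskip : pvA_skipF l (l.length : Int) ((PySem.List.pyGet? l i).getD "") (i + 1)
              = (reSpec l i.toNat : Int) + 1 := by
            rw [hgx]
            simp only [Option.getD_some]
            have e : i + 1 = ((i.toNat : Nat) : Int) + 1 := by omega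
            rw [e]
            exact skipF_eq l i.toNat l[i.toNat] hmlt (by simp [hmlt])
          have hre : (PySem.List.pyGet? (pvB_runEnds l 0) i).getD 0 = (reSpec l i.toNat : Int) := by
            rw [pyGet?_of_lt' (pvB_runEnds l 0) i hi, runEnds_get l 0 i.toNat hmlt]
            simp
          rw [hskip, hre]
          have e2 : (reSpec l i.toNat : Int) + 1 + 1 = (reSpec l i.toNat : Int) + 2 := by ring
          rw [e2]
          exact ihf (k + 1) _ (by omega) (by positivity)
        · rw [pvA_loopF, pvB_jumpF, dif_neg hc, dif_neg hc]
  exact main (r - k).toNat k i le_rfl hi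

theorem loopB_eq (l : List String) (r : Int) (k j : Int) (hj : j < (l.length : Int)) :
    pvA_loopB l r j k = pvB_jumpB (pvB_runStarts l) r j k := by
  have main : ∀ fuel (k j : Int), (r - k).toNat ≤ fuel → j < (l.length : Int) →
      pvA_loopB l r j k = pvB_jumpB (pvB_runStarts l) r j k := by
    intro fuel
    induction fuel with
    | zero =>
        intro k j hf _
        rw [pvA_loopB, pvB_jumpB, dif_neg (by omega), dif_neg (by omega)]
    | succ fuel ihf =>
        intro k j hf hj
        by_cases hc : 0 ≤ j ∧ k < r
        · rw [pvA_loopB, pvB_jumpB, dif_pos hc, dif_pos hc]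
          have hmlt : j.toNat < l.length := by omega
          have hgx : PySem.List.pyGet? l j = some l[j.toNat] := by
            rw [pyGet?_of_lt l j hc.1]
            simp [hmlt]
          have hskip : pvA_skipB l ((PySem.List.pyGet? l j).getD "") (j - 1)
              = (rsSpec l j.toNat : Int) - 1 := by
            rw [hgx]
            simp only [Option.getD_some]
            have e : j - 1 = ((j.toNat : Nat) : Int) - 1 := by omega
            rw [e]
            exact skipB_eq l j.toNat l[j.toNat] hmlt (by simp [hmlt])
          have hrs : (PySem.List.pyGet? (pvB_runStarts l) j).getD 0 = (rsSpec l j.toNat : Int) := by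
            rw [pyGet?_of_lt' (pvB_runStarts l) j hc.1, runStarts_get l j.toNat hmlt]
            simp
          rw [hskip, hrs]
          have e2 : (rsSpec l j.toNat : Int) - 1 - 1 = (rsSpec l j.toNat : Int) - 2 := by ring
          rw [e2]
          refine ihf (k + 1) _ (by omega) ?_
          have := rsSpec_le l j.toNat
          omega
        · rw [pvA_loopB, pvB_jumpB, dif_neg hc, dif_neg hc]
  exact main (r - k).toNat k j le_rfl hj

-- ===== VERDICT (by name: the statement is the Claim_ definition above) =====
theorem prefix_suffix_all_subwords_spec : Claim_equal_prefix_suffix_all_subwords := by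
  intro left r _
  unfold Spec_prefix_suffix_all_subwords prefix_suffix_all_subwords prefix_suffix_all_subwords_alt
  simp only
  rw [loopF_eq left r 0 0 (by omega), loopB_eq left r 0 ((left.length : Int) - 1) (by omega)]
  split_ifs with h1 h2 <;> try rfl
  have : (left.length : Int) - (pvB_jumpF (pvB_runEnds left 0) left.length r 0 0 - 1 + 1)
      - ((left.length : Int) - (pvB_jumpB (pvB_runStarts left) r (left.length - 1) 0 + 1))
      = (pvB_jumpB (pvB_runStarts left) r (left.length - 1) 0 + 1)
        - (pvB_jumpF (pvB_runEnds left 0) left.length r 0 0 - 1) - 1 := by ring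
  rw [this]
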